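-- pv_equiv track=rewrite | github.com/Genentech/Move37 | src/move37/services/scheduling.py | _collect_branch_roots
-- ===== SOURCE A (Python) =====
-- def _collect_branch_roots(activity_id: str, parent_map: dict[str, list[str]]) -> list[str]:
--     roots: set[str] = set()
--     stack = [activity_id]
--     seen: set[str] = set()
--     while stack:
--         current = stack.pop()
--         if current in seen:
--             continue
--         seen.add(current)
--         parents = parent_map.get(current, [])
--         if not parents:
--             roots.add(current)
--             continue
--         stack.extend(parents)
--     return sorted(roots)
-- ===== SOURCE B (Python) =====
-- def _collect_branch_roots(activity_id: str, parent_map: dict[str, list[str]]) -> list[str]: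
--     seen = {activity_id}
--     queue = [activity_id]
--     i = 0
--     while i < len(queue):
--         for p in parent_map.get(queue[i], []):
--             if p not in seen:
--                 seen.add(p)
--                 queue.append(p)
--         i += 1
--     return sorted(n for n in seen if not parent_map.get(n, []))
-- ===== Notes on version B (the rewrite author's own statement) =====
-- stated objective: alternative
-- what changed: B replaces A's LIFO stack that may hold duplicates and classifies roots during the walk by a FIFO queue that marks nodes seen at enqueue time (so each node is enqueued at most once), computing the reachable set first and filtering the parentless nodes afterwards.
import Mathlib
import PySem

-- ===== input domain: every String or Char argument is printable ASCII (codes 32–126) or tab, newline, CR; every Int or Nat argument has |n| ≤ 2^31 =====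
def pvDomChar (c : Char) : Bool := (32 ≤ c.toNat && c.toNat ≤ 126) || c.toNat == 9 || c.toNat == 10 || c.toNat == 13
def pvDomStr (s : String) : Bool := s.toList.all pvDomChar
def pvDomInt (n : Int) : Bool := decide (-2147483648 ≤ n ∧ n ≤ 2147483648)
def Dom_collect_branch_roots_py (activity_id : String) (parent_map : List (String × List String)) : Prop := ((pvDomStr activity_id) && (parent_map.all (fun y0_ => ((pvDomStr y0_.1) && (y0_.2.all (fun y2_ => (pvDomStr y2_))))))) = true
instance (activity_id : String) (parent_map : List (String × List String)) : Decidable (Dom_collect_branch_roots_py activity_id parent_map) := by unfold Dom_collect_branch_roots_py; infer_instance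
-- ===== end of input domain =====

-- B replaces A's LIFO stack (which may hold duplicates and classifies roots during the walk)
-- by a FIFO queue with mark-at-enqueue that computes the reachable set first and filters the
-- parentless nodes afterwards; same asymptotic cost (objective: alternative).

-- shared transliteration of `parent_map.get(n, [])` (first-match association-list lookup)
def pvParents (pm : List (String × List String)) (n : String) : List String :=
  (PySem.Dict.mk pm).getD n []

-- ---- helpers the ports need for termination (cited in decreasing_by) ----
def pvU (pm : List (String × List String)) : List String :=
  pm.map (fun e => e.1) ++ pm.flatMap (fun e => e.2)

def pvUnseen (pm : List (String × List String)) (seen : List String) : Nat :=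
  (pvU pm).countP (fun x => decide (¬ x ∈ seen))

lemma pvCountP_lt {α : Type} {p q : α → Bool} {l : List α}
    (hmono : ∀ x, p x = true → q x = true) {c : α} (hc : c ∈ l)
    (hpc : p c = false) (hqc : q c = true) :
    l.countP p < l.countP q := by
  induction l with
  | nil => cases hc
  | cons a t ih =>
    have hle : t.countP p ≤ t.countP q :=
      List.countP_mono_left (fun x _ hx => hmono x hx)
    have ep : (a :: t).countP p = t.countP p + (if p a = true then 1 else 0) :=
      List.countP_cons
    have eq' : (a :: t).countP q = t.countP q + (if q a = true then 1 else 0) :=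
      List.countP_cons
    have hif : (if p a = true then 1 else 0) ≤ (if q a = true then 1 else 0) := by
      by_cases h : p a = true
      · simp [h, hmono a h]
      · simp [h]
    rcases List.mem_cons.mp hc with h | h
    · subst h
      rw [ep, eq', hpc, hqc]
      simp only [Bool.false_eq_true, if_false, if_true]
      omega
    · have hlt := ih h
      rw [ep, eq']
      omega

lemma pvUnseen_le {pm : List (String × List String)} {s t : List String}
    (hsub : ∀ x ∈ s, x ∈ t) : pvUnseen pm t ≤ pvUnseen pm s := by
  unfold pvUnseen
  exact List.countP_mono_left (fun x _ hx => by
    simp only [decide_eq_true_eq] at hx ⊢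
    exact fun hxs => hx (hsub x hxs))

lemma pvUnseen_lt {pm : List (String × List String)} {s t : List String} {c : String}
    (hsub : ∀ x ∈ s, x ∈ t) (hcU : c ∈ pvU pm) (hcs : c ∉ s) (hct : c ∈ t) :
    pvUnseen pm t < pvUnseen pm s := by
  unfold pvUnseen
  exact pvCountP_lt
    (fun x hx => by
      simp only [decide_eq_true_eq] at hx ⊢
      exact fun hxs => hx (hsub x hxs))
    hcU (by simp [hct]) (by simp [hcs])

lemma pvParents_mem_flatMap {pm : List (String × List String)} {n x : String}
    (hx : x ∈ pvParents pm n) : x ∈ pm.flatMap (fun e => e.2) := by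
  unfold pvParents PySem.Dict.getD PySem.Dict.get? at hx
  cases hf : List.find? (fun p => p.1 == n) (PySem.Dict.mk pm).items with
  | none => rw [hf] at hx; simp at hx
  | some pr =>
    rw [hf] at hx
    simp only [Option.map_some, Option.getD_some] at hx
    exact List.mem_flatMap.mpr ⟨pr, List.mem_of_find?_eq_some hf, hx⟩

lemma pvParents_ne_nil_mem_keys {pm : List (String × List String)} {n : String}
    (h : pvParents pm n ≠ []) : n ∈ pm.map (fun e => e.1) := by
  unfold pvParents PySem.Dict.getD PySem.Dict.get? at h
  cases hf : List.find? (fun p => p.1 == n) (PySem.Dict.mk pm).items with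
  | none => rw [hf] at h; simp at h
  | some pr =>
    have h1 := List.find?_some hf
    have h2 : pr ∈ pm := List.mem_of_find?_eq_some hf
    simp only [beq_iff_eq] at h1
    exact h1 ▸ List.mem_map_of_mem h2

-- B's inner loop body: 'if p not in seen: seen.add(p); queue.append(p)'
def pvStep (st : PySem.Set String × List String) (p : String) : PySem.Set String × List String :=
  if PySem.Set.contains st.1 p then st else (PySem.Set.add st.1 p, st.2 ++ [p])

-- what B's inner for-loop (over the parents of one dequeued node) does, as one equation
lemma pvBFold (ps : List String) : ∀ (s acc : List String),
    ∃ d : List String,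
      ps.foldl pvStep (s, acc) = (s ++ d, acc ++ d)
      ∧ (∀ x ∈ d, x ∈ ps ∧ x ∉ s)
      ∧ (∀ p ∈ ps, p ∈ s ++ d)
      ∧ d.Nodup := by
  induction ps with
  | nil =>
    intro s acc
    exact ⟨[], by simp, by simp, by simp, by simp⟩
  | cons p ps ih =>
    intro s acc
    by_cases hp : PySem.Set.contains s p = true
    · obtain ⟨d, h1, h2, h3, h4⟩ := ih s acc
      refine ⟨d, ?_, ?_, ?_, h4⟩
      · simpa only [List.foldl_cons, pvStep, if_pos hp] using h1
      · exact fun x hx => ⟨List.mem_cons_of_mem _ (h2 x hx).1, (h2 x hx).2⟩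
      · intro q hq
        rcases List.mem_cons.mp hq with rfl | hq'
        · exact List.mem_append_left _
            (List.contains_iff_mem.mp (by simpa [PySem.Set.contains] using hp))
        · exact h3 q hq'
    · obtain ⟨d, h1, h2, h3, h4⟩ := ih (s ++ [p]) (acc ++ [p])
      have hp' : PySem.Set.contains s p = false := by simpa using hp
      have hps : p ∉ s := by
        intro hmem
        rw [show PySem.Set.contains s p = List.contains s p from rfl,
          List.contains_iff_mem.mpr hmem] at hp'
        cases hp'
      have hstep : pvStep (s, acc) p = (s ++ [p], acc ++ [p]) := by
        simp [pvStep, PySem.Set.add, PySem.Set.contains, hps]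
      refine ⟨p :: d, ?_, ?_, ?_, ?_⟩
      · rw [List.foldl_cons, hstep, h1]
        simp [List.append_assoc]
      · intro x hx
        rcases List.mem_cons.mp hx with rfl | hx'
        · exact ⟨List.mem_cons_self, hps⟩
        · obtain ⟨ha, hb⟩ := h2 x hx'
          exact ⟨List.mem_cons_of_mem _ ha, fun hs => hb (List.mem_append_left _ hs)⟩
      · intro q hq
        rcases List.mem_cons.mp hq with rfl | hq'
        · simp
        · have := h3 q hq'
          simp only [List.mem_append, List.mem_cons] at this ⊢
          tauto
      · exact List.nodup_cons.mpr ⟨fun hpd => (h2 p hpd).2 (by simp), h4⟩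

-- ===== PORT A =====
-- A's while-loop: stack is head-at-top (pop = head; extend(parents) = parents.reverse ++ rest)
def pvALoop (pm : List (String × List String)) (stack : List String)
    (seen roots : PySem.Set String) : PySem.Set String × PySem.Set String :=
  match stack with
  | [] => (seen, roots)
  | current :: rest =>
    if hseen : PySem.Set.contains seen current = true then
      pvALoop pm rest seen roots
    else if hpar : pvParents pm current = [] then
      pvALoop pm rest (PySem.Set.add seen current) (PySem.Set.add roots current)
    else
      pvALoop pm ((pvParents pm current).reverse ++ rest) (PySem.Set.add seen current) roots
termination_by (pvUnseen pm seen, stack.length)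
decreasing_by
  · simp only [List.length_cons]
    exact Prod.Lex.right _ (Nat.lt_succ_self _)
  · have hsub : ∀ x ∈ seen, x ∈ PySem.Set.add seen current :=
      fun x hx => (PySem.Set.mem_add seen current x).mpr (Or.inl hx)
    simp only [List.length_cons]
    rcases lt_or_eq_of_le (pvUnseen_le (pm := pm) hsub) with h | h
    · exact Prod.Lex.left _ _ h
    · rw [h]
      exact Prod.Lex.right _ (Nat.lt_succ_self _)
  · have hsub : ∀ x ∈ seen, x ∈ PySem.Set.add seen current :=
      fun x hx => (PySem.Set.mem_add seen current x).mpr (Or.inl hx)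
    have hcs : current ∉ seen := fun hmem =>
      hseen (by simp [PySem.Set.contains, List.contains_iff_mem, hmem])
    have hcU : current ∈ pvU pm := by
      unfold pvU
      exact List.mem_append_left _ (pvParents_ne_nil_mem_keys hpar)
    exact Prod.Lex.left _ _
      (pvUnseen_lt hsub hcU hcs ((PySem.Set.mem_add seen current current).mpr (Or.inr rfl)))

def collect_branch_roots_py (activity_id : String) (parent_map : List (String × List String)) : List String :=
  PySem.List.sorted (pvALoop parent_map [activity_id] PySem.Set.empty PySem.Set.empty).2
    (fun x => x) false

-- ===== PORT B =====
-- B's while-loop over the FIFO queue: pending is the unprocessed suffix of the queue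
def pvBLoop (pm : List (String × List String)) (pending : List String)
    (seen : PySem.Set String) : PySem.Set String :=
  match pending with
  | [] => seen
  | n :: rest =>
    let res := (pvParents pm n).foldl pvStep (seen, [])
    pvBLoop pm (rest ++ res.2) res.1
termination_by (pvUnseen pm seen, pending.length)
decreasing_by
  obtain ⟨d, hf, hd, hcov, hnd⟩ := pvBFold (pvParents pm n) seen []
  simp only [hf, List.nil_append, List.length_cons]
  cases d with
  | nil =>
    simp only [List.append_nil]
    exact Prod.Lex.right _ (Nat.lt_succ_self _)
  | cons x d' =>
    have hx := hd x (by simp)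
    refine Prod.Lex.left _ _ (pvUnseen_lt (s := seen) (t := seen ++ x :: d')
      (fun y hy => List.mem_append_left _ hy) ?_ hx.2 (by simp))
    unfold pvU
    exact List.mem_append_right _ (pvParents_mem_flatMap hx.1)

def collect_branch_roots_py_alt (activity_id : String) (parent_map : List (String × List String)) : List String :=
  PySem.List.sorted
    ((pvBLoop parent_map [activity_id] (PySem.Set.add PySem.Set.empty activity_id)).filter
      (fun n => (pvParents parent_map n).isEmpty))
    (fun x => x) false

-- ===== PRECONDITION & SPEC =====
def Spec_collect_branch_roots_py (activity_id : String) (parent_map : List (String × List String)) (out : List String) : Prop := out = collect_branch_roots_py_alt activity_id parent_map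
instance (activity_id : String) (parent_map : List (String × List String)) (out : List String) : Decidable (Spec_collect_branch_roots_py activity_id parent_map out) := by unfold Spec_collect_branch_roots_py; infer_instance

-- ===== CLAIM (what is proved, stated in full; the proofs are below) =====
def Claim_equal_collect_branch_roots_py : Prop := ∀ (activity_id : String) (parent_map : List (String × List String)), Dom_collect_branch_roots_py activity_id parent_map → Spec_collect_branch_roots_py activity_id parent_map (collect_branch_roots_py activity_id parent_map)

-- ===== LEMMAS AND PROOFS =====

-- upward reachability through parent_map, the common characterisation of both loops
inductive pvReach (pm : List (String × List String)) (a : String) : String → Prop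
  | refl : pvReach pm a a
  | step {n p : String} : pvReach pm a n → p ∈ pvParents pm n → pvReach pm a p

lemma pvALoop_spec (pm : List (String × List String)) (a : String)
    (stack : List String) (seen roots : PySem.Set String) :
    (∀ x ∈ stack, pvReach pm a x) →
    (∀ x ∈ seen, pvReach pm a x) →
    (∀ x, x ∈ roots ↔ x ∈ seen ∧ pvParents pm x = []) →
    (∀ x ∈ seen, ∀ p ∈ pvParents pm x, p ∈ seen ∨ p ∈ stack) →
    roots.Nodup →
    (∀ x ∈ (pvALoop pm stack seen roots).1, pvReach pm a x) ∧
    (∀ x ∈ seen, x ∈ (pvALoop pm stack seen roots).1) ∧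
    (∀ x ∈ stack, x ∈ (pvALoop pm stack seen roots).1) ∧
    (∀ x ∈ (pvALoop pm stack seen roots).1, ∀ p ∈ pvParents pm x, p ∈ (pvALoop pm stack seen roots).1) ∧
    (∀ x, x ∈ (pvALoop pm stack seen roots).2 ↔ x ∈ (pvALoop pm stack seen roots).1 ∧ pvParents pm x = []) ∧
    (pvALoop pm stack seen roots).2.Nodup := by
  fun_induction pvALoop pm stack seen roots with
  | case1 seen roots =>
    intro h1 h2 h3 h4 h5
    refine ⟨h2, fun x hx => hx, by simp, ?_, h3, h5⟩
    intro x hx p hp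
    rcases h4 x hx p hp with h | h
    · exact h
    · simp at h
  | case2 seen roots current rest hseen ih =>
    intro h1 h2 h3 h4 h5
    have hcur : current ∈ seen := List.contains_iff_mem.mp (by simpa [PySem.Set.contains] using hseen)
    have h1' : ∀ x ∈ rest, pvReach pm a x := fun x hx => h1 x (List.mem_cons_of_mem _ hx)
    have h4' : ∀ x ∈ seen, ∀ p ∈ pvParents pm x, p ∈ seen ∨ p ∈ rest := by
      intro x hx p hp
      rcases h4 x hx p hp with h | h
      · exact Or.inl h
      · rcases List.mem_cons.mp h with rfl | h'
        · exact Or.inl hcur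
        · exact Or.inr h'
    obtain ⟨c1, c2, c3, c4, c5, c6⟩ := ih h1' h2 h3 h4' h5
    refine ⟨c1, c2, ?_, c4, c5, c6⟩
    intro x hx
    rcases List.mem_cons.mp hx with rfl | hx'
    · exact c2 x hcur
    · exact c3 x hx'
  | case3 seen roots current rest hseen hpar ih =>
    intro h1 h2 h3 h4 h5
    have hcr : pvReach pm a current := h1 current List.mem_cons_self
    have h1' : ∀ x ∈ rest, pvReach pm a x := fun x hx => h1 x (List.mem_cons_of_mem _ hx)
    have h2' : ∀ x ∈ PySem.Set.add seen current, pvReach pm a x := by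
      intro x hx
      rcases (PySem.Set.mem_add seen current x).mp hx with h | rfl
      · exact h2 x h
      · exact hcr
    have h3' : ∀ x, x ∈ PySem.Set.add roots current ↔
        x ∈ PySem.Set.add seen current ∧ pvParents pm x = [] := by
      intro x
      rw [PySem.Set.mem_add, h3, PySem.Set.mem_add]
      constructor
      · rintro (⟨hs, hp⟩ | rfl)
        · exact ⟨Or.inl hs, hp⟩
        · exact ⟨Or.inr rfl, hpar⟩
      · rintro ⟨hs | rfl, hp⟩
        · exact Or.inl ⟨hs, hp⟩
        · exact Or.inr rfl
    have h4' : ∀ x ∈ PySem.Set.add seen current, ∀ p ∈ pvParents pm x,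
        p ∈ PySem.Set.add seen current ∨ p ∈ rest := by
      intro x hx p hp
      rcases (PySem.Set.mem_add seen current x).mp hx with h | rfl
      · rcases h4 x h p hp with h' | h'
        · exact Or.inl ((PySem.Set.mem_add seen current p).mpr (Or.inl h'))
        · rcases List.mem_cons.mp h' with rfl | h''
          · exact Or.inl ((PySem.Set.mem_add seen p p).mpr (Or.inr rfl))
          · exact Or.inr h''
      · rw [hpar] at hp
        cases hp
    obtain ⟨c1, c2, c3, c4, c5, c6⟩ :=
      ih h1' h2' h3' h4' (PySem.Set.nodup_add roots current h5)
    have hsub : ∀ x ∈ seen, x ∈ (pvALoop pm rest (PySem.Set.add seen current) (PySem.Set.add roots current)).1 :=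
      fun x hx => c2 x ((PySem.Set.mem_add seen current x).mpr (Or.inl hx))
    refine ⟨c1, hsub, ?_, c4, c5, c6⟩
    intro x hx
    rcases List.mem_cons.mp hx with rfl | hx'
    · exact c2 x ((PySem.Set.mem_add seen x x).mpr (Or.inr rfl))
    · exact c3 x hx'
  | case4 seen roots current rest hseen hpar ih =>
    intro h1 h2 h3 h4 h5
    have hcr : pvReach pm a current := h1 current List.mem_cons_self
    have h1' : ∀ x ∈ (pvParents pm current).reverse ++ rest, pvReach pm a x := by
      intro x hx
      rcases List.mem_append.mp hx with h | h
      · exact pvReach.step hcr (List.mem_reverse.mp h)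
      · exact h1 x (List.mem_cons_of_mem _ h)
    have h2' : ∀ x ∈ PySem.Set.add seen current, pvReach pm a x := by
      intro x hx
      rcases (PySem.Set.mem_add seen current x).mp hx with h | rfl
      · exact h2 x h
      · exact hcr
    have h3' : ∀ x, x ∈ roots ↔ x ∈ PySem.Set.add seen current ∧ pvParents pm x = [] := by
      intro x
      rw [h3, PySem.Set.mem_add]
      constructor
      · rintro ⟨hs, hp⟩
        exact ⟨Or.inl hs, hp⟩
      · rintro ⟨hs | rfl, hp⟩
        · exact ⟨hs, hp⟩
        · exact (hpar hp).elim
    have h4' : ∀ x ∈ PySem.Set.add seen current, ∀ p ∈ pvParents pm x,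
        p ∈ PySem.Set.add seen current ∨ p ∈ (pvParents pm current).reverse ++ rest := by
      intro x hx p hp
      rcases (PySem.Set.mem_add seen current x).mp hx with h | rfl
      · rcases h4 x h p hp with h' | h'
        · exact Or.inl ((PySem.Set.mem_add seen current p).mpr (Or.inl h'))
        · rcases List.mem_cons.mp h' with rfl | h''
          · exact Or.inl ((PySem.Set.mem_add seen p p).mpr (Or.inr rfl))
          · exact Or.inr (List.mem_append_right _ h'')
      · exact Or.inr (List.mem_append_left _ (List.mem_reverse.mpr hp))
    obtain ⟨c1, c2, c3, c4, c5, c6⟩ := ih h1' h2' h3' h4' h5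
    have hsub : ∀ x ∈ seen,
        x ∈ (pvALoop pm ((pvParents pm current).reverse ++ rest) (PySem.Set.add seen current) roots).1 :=
      fun x hx => c2 x ((PySem.Set.mem_add seen current x).mpr (Or.inl hx))
    refine ⟨c1, hsub, ?_, c4, c5, c6⟩
    intro x hx
    rcases List.mem_cons.mp hx with rfl | hx'
    · exact c2 x ((PySem.Set.mem_add seen x x).mpr (Or.inr rfl))
    · exact c3 x (List.mem_append_right _ hx')

lemma pvA_char (pm : List (String × List String)) (a : String) :
    (∀ x, x ∈ (pvALoop pm [a] [] []).2 ↔ pvReach pm a x ∧ pvParents pm x = []) ∧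
    (pvALoop pm [a] [] []).2.Nodup := by
  obtain ⟨c1, c2, c3, c4, c5, c6⟩ := pvALoop_spec pm a [a] [] []
    (by intro x hx; simp at hx; subst hx; exact pvReach.refl)
    (by simp) (by simp) (by simp) List.nodup_nil
  have hmem : ∀ x, pvReach pm a x → x ∈ (pvALoop pm [a] [] []).1 := by
    intro x hx
    induction hx with
    | refl => exact c3 a (by simp)
    | step hr hp ih => exact c4 _ ih _ hp
  refine ⟨fun x => ?_, c6⟩
  rw [c5]
  exact ⟨fun ⟨h1, h2⟩ => ⟨c1 x h1, h2⟩, fun ⟨h1, h2⟩ => ⟨hmem x h1, h2⟩⟩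

lemma pvBLoop_spec (pm : List (String × List String)) (a : String)
    (pending : List String) (seen : PySem.Set String) :
    (∀ x ∈ seen, pvReach pm a x) →
    (∀ x ∈ pending, x ∈ seen) →
    a ∈ seen →
    (∀ x ∈ seen, x ∈ pending ∨ ∀ p ∈ pvParents pm x, p ∈ seen) →
    seen.Nodup →
    (∀ x ∈ pvBLoop pm pending seen, pvReach pm a x) ∧
    (∀ x ∈ seen, x ∈ pvBLoop pm pending seen) ∧
    (∀ x ∈ pvBLoop pm pending seen, ∀ p ∈ pvParents pm x, p ∈ pvBLoop pm pending seen) ∧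
    a ∈ pvBLoop pm pending seen ∧
    (pvBLoop pm pending seen).Nodup := by
  fun_induction pvBLoop pm pending seen with
  | case1 seen =>
    intro h1 h2 h3 h4 h5
    refine ⟨h1, fun x hx => hx, ?_, h3, h5⟩
    intro x hx p hp
    rcases h4 x hx with h | h
    · simp at h
    · exact h p hp
  | case2 seen n rest res ih =>
    intro h1 h2 h3 h4 h5
    obtain ⟨d, hf, hd, hcov, hnd⟩ := pvBFold (pvParents pm n) seen []
    have hres : res = (seen ++ d, [] ++ d) := hf
    rw [hres] at ih ⊢
    simp only [List.nil_append] at ih ⊢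
    have hnr : pvReach pm a n := h1 n (h2 n List.mem_cons_self)
    have h1' : ∀ x ∈ seen ++ d, pvReach pm a x := by
      intro x hx
      rcases List.mem_append.mp hx with h | h
      · exact h1 x h
      · exact pvReach.step hnr (hd x h).1
    have h2' : ∀ x ∈ rest ++ d, x ∈ seen ++ d := by
      intro x hx
      rcases List.mem_append.mp hx with h | h
      · exact List.mem_append_left _ (h2 x (List.mem_cons_of_mem _ h))
      · exact List.mem_append_right _ h
    have h3' : a ∈ seen ++ d := List.mem_append_left _ h3
    have h4' : ∀ x ∈ seen ++ d, x ∈ rest ++ d ∨ ∀ p ∈ pvParents pm x, p ∈ seen ++ d := by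
      intro x hx
      rcases List.mem_append.mp hx with h | h
      · rcases h4 x h with h' | h'
        · rcases List.mem_cons.mp h' with rfl | h''
          · exact Or.inr (fun p hp => hcov p hp)
          · exact Or.inl (List.mem_append_left _ h'')
        · exact Or.inr (fun p hp => List.mem_append_left _ (h' p hp))
      · exact Or.inl (List.mem_append_right _ h)
    have h5' : (seen ++ d).Nodup :=
      List.nodup_append.mpr ⟨h5, hnd, fun u hu v hv huv => (hd v hv).2 (huv ▸ hu)⟩
    obtain ⟨c1, c2, c3, c4, c5⟩ := ih h1' h2' h3' h4' h5'
    exact ⟨c1, fun x hx => c2 x (List.mem_append_left _ hx), c3, c4, c5⟩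

lemma pvB_char (pm : List (String × List String)) (a : String) :
    (∀ x, x ∈ pvBLoop pm [a] [a] ↔ pvReach pm a x) ∧ (pvBLoop pm [a] [a]).Nodup := by
  obtain ⟨c1, c2, c3, c4, c5⟩ := pvBLoop_spec pm a [a] [a]
    (by intro x hx; simp at hx; subst hx; exact pvReach.refl)
    (fun x hx => hx) (by simp)
    (fun x hx => Or.inl hx) (by simp)
  refine ⟨fun x => ⟨c1 x, fun hr => ?_⟩, c5⟩
  induction hr with
  | refl => exact c4
  | step hn hp ih => exact c3 _ ih _ hp

-- ===== VERDICT (by name: the statement is the Claim_ definition above) =====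
theorem collect_branch_roots_py_spec : Claim_equal_collect_branch_roots_py := by
  intro a pm _
  unfold Spec_collect_branch_roots_py collect_branch_roots_py collect_branch_roots_py_alt
  rw [show (PySem.Set.empty : PySem.Set String) = [] from rfl,
    show PySem.Set.add ([] : PySem.Set String) a = [a] from rfl]
  obtain ⟨hAmem, hAnd⟩ := pvA_char pm a
  obtain ⟨hBmem, hBnd⟩ := pvB_char pm a
  rw [PySem.List.sorted_id_eq_sorted_id_iff_perm]
  refine (List.perm_ext_iff_of_nodup hAnd (List.Nodup.filter _ hBnd)).mpr ?_
  intro x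
  rw [hAmem x, List.mem_filter]
  constructor
  · rintro ⟨hr, hp⟩
    exact ⟨(hBmem x).mpr hr, by simp [hp]⟩
  · rintro ⟨hb, hp⟩
    exact ⟨(hBmem x).mp hb, by simpa using hp⟩
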